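-- pv_equiv track=rewrite | github.com/Idotopaz/Afeka-python | Home Work/Task 8/max_on_edge.py | max_on_edge
-- ===== SOURCE A (Python) =====
-- def max_on_edge(numbers):
--
--     maxi0 = max(numbers[0]) #max first list
--     maxi_1 = max(numbers[-1]) #max last list
--     list1 = [] #new list for left colum
--     list2 = [] ##new list for right colum
--
--     for i in range(len(numbers)):
--         list1.append(numbers[i][0])
--         list2.append(numbers[i][-1])
--
--     maxi_co = max(list1) #max left colum
--     maxi_c_1 = max(list2) #max right colum
--
--     max_total = max(maxi0,maxi_co,maxi_c_1,maxi_1) #max all edges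
--
--     return max_total
-- ===== SOURCE B (Python) =====
-- def max_on_edge(numbers):
--     n = len(numbers)
--     edges = [v
--              for i, row in enumerate(numbers)
--              for j, v in enumerate(row)
--              if i == 0 or i == n - 1 or j == 0 or j == len(row) - 1]
--     return max(edges)
-- ===== Notes on version B (the rewrite author's own statement) =====
-- stated objective: alternative
-- what changed: B selects edge cells by a coordinate predicate (i==0 or i==n-1 or j==0 or j==len(row)-1) in one comprehension over every cell of the grid and takes a single max of that list, instead of A's four structural picks (max of first row, max of last row, and two materialised column lists) combined by a final four-way max; B trades A's edge-only traversal for a uniform full-grid filter.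
import Mathlib
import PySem

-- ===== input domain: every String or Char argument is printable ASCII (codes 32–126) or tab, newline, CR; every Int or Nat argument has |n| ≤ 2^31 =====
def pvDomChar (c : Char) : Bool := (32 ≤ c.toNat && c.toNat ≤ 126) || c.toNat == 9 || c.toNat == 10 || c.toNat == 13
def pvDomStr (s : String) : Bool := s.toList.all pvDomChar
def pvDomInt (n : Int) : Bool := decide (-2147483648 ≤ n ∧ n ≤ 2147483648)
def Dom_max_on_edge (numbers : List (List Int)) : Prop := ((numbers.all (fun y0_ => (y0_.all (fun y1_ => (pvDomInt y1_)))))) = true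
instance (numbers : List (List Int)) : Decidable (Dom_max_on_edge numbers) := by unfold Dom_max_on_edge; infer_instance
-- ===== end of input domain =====

-- B takes the max of one coordinate-filtered list of all cells (edge predicate on (i,j))
-- instead of A's four structural picks over rows and materialised column lists (alternative).

-- ===== PORT A =====
def max_on_edge (numbers : List (List Int)) : Int :=
  let maxi0 := (PySem.List.max? ((PySem.List.pyGet? numbers 0).getD []) (fun y => y)).getD 0
  let maxi_1 := (PySem.List.max? ((PySem.List.pyGet? numbers (-1)).getD []) (fun y => y)).getD 0
  let p := (PySem.List.pyRange 0 numbers.length 1).foldl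
    (fun (p : List Int × List Int) i =>
      (p.1 ++ [PySem.List.pyGetD (PySem.List.pyGetD numbers i []) 0 0],
       p.2 ++ [PySem.List.pyGetD (PySem.List.pyGetD numbers i []) (-1) 0]))
    ([], [])
  let maxi_co := (PySem.List.max? p.1 (fun y => y)).getD 0
  let maxi_c_1 := (PySem.List.max? p.2 (fun y => y)).getD 0
  max (max (max maxi0 maxi_co) maxi_c_1) maxi_1

-- ===== PORT B =====
def max_on_edge_alt (numbers : List (List Int)) : Int :=
  let n : Int := numbers.length
  let edges := (PySem.List.enumerate numbers 0).foldl
    (fun acc p =>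
      acc ++ ((PySem.List.enumerate p.2 0).foldl
        (fun acc2 q =>
          if p.1 = 0 ∨ p.1 = n - 1 ∨ q.1 = 0 ∨ q.1 = ((p.2.length : Int)) - 1
          then acc2 ++ [q.2] else acc2) []))
    []
  (PySem.List.max? edges (fun y => y)).getD 0

-- ===== PRECONDITION & SPEC =====
-- A raises IndexError on an empty grid and ValueError/IndexError on a grid with an empty row;
-- Pre_ excludes exactly those inputs.
def Pre_max_on_edge (numbers : List (List Int)) : Prop :=
  numbers ≠ [] ∧ ∀ row ∈ numbers, row ≠ []
instance (numbers : List (List Int)) : Decidable (Pre_max_on_edge numbers) := by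
  unfold Pre_max_on_edge; infer_instance
def pvWitness_max_on_edge : List (List Int) := [[1, 2], [3, 4], [5, 6]]
def Spec_max_on_edge (numbers : List (List Int)) (out : Int) : Prop := out = max_on_edge_alt numbers
instance (numbers : List (List Int)) (out : Int) : Decidable (Spec_max_on_edge numbers out) := by unfold Spec_max_on_edge; infer_instance

-- ===== CLAIM (what is proved, stated in full; the proofs are below) =====
def Claim_equal_max_on_edge : Prop := ∀ (numbers : List (List Int)), Dom_max_on_edge numbers → Pre_max_on_edge numbers → Spec_max_on_edge numbers (max_on_edge numbers)

-- ===== LEMMAS AND PROOFS =====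

theorem M_le_iff (row : List Int) (h : row ≠ []) (b : Int) :
    (PySem.List.max? row (fun y => y)).getD 0 ≤ b ↔ ∀ y ∈ row, y ≤ b := by
  obtain ⟨m, hm⟩ : ∃ m, PySem.List.max? row (fun y => y) = some m := by
    cases e : PySem.List.max? row (fun y => y) with
    | none => exact absurd ((PySem.List.max?_eq_none_iff row (fun y => y)).mp e) h
    | some m => exact ⟨m, rfl⟩
  rw [hm]; simp only [Option.getD_some]
  constructor
  · intro hb y hy; exact le_trans (PySem.List.max?_isMax hm y hy) hb
  · intro hall; exact hall m (PySem.List.max?_mem hm)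

theorem mem_le_M (row : List Int) (h : row ≠ []) (y : Int) (hy : y ∈ row) :
    y ≤ (PySem.List.max? row (fun y => y)).getD 0 :=
  (M_le_iff row h _).mp le_rfl y hy

-- A's index fold builds exactly the two column lists
theorem col_fold_eq (numbers : List (List Int)) (l1 l2 : List Int) :
    numbers.foldl
      (fun (p : List Int × List Int) row =>
        (p.1 ++ [PySem.List.pyGetD row 0 0], p.2 ++ [PySem.List.pyGetD row (-1) 0]))
      (l1, l2) =
      (l1 ++ numbers.map (fun row => PySem.List.pyGetD row 0 0),
       l2 ++ numbers.map (fun row => PySem.List.pyGetD row (-1) 0)) := by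
  induction numbers generalizing l1 l2 with
  | nil => simp
  | cons r t ih => simp [ih]

theorem h0_eq (row : List Int) (h : 0 < row.length) :
    PySem.List.pyGetD row 0 0 = row[0] := by
  simp [PySem.List.pyGetD, PySem.List.pyGet?_zero, List.getElem?_eq_getElem h]

theorem h1_eq (row : List Int) (h : row ≠ []) :
    PySem.List.pyGetD row (-1) 0 = row[row.length - 1]'(by
      have := List.length_pos_iff.mpr h; omega) := by
  simp [PySem.List.pyGetD, PySem.List.pyGet?_neg_one,
    List.getLast?_eq_some_getLast h, List.getLast_eq_getElem]

-- the edges list of B, in flatMap/filter form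
def edgesOf (numbers : List (List Int)) : List Int :=
  (PySem.List.enumerate numbers 0).flatMap
    (fun p =>
      ((PySem.List.enumerate p.2 0).filter
        (fun q => decide (p.1 = 0 ∨ p.1 = (numbers.length : Int) - 1 ∨ q.1 = 0 ∨
          q.1 = ((p.2.length : Int)) - 1))).map (fun q => q.2))

theorem outer_fold (n : Int) (l : List (Int × List Int)) (acc : List Int) :
    l.foldl
      (fun acc p =>
        acc ++ ((PySem.List.enumerate p.2 0).foldl
          (fun acc2 q =>
            if p.1 = 0 ∨ p.1 = n - 1 ∨ q.1 = 0 ∨ q.1 = ((p.2.length : Int)) - 1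
            then acc2 ++ [q.2] else acc2) [])) acc
      = acc ++ l.flatMap
          (fun p => ((PySem.List.enumerate p.2 0).filter
            (fun q => decide (p.1 = 0 ∨ p.1 = n - 1 ∨ q.1 = 0 ∨
              q.1 = ((p.2.length : Int)) - 1))).map (fun q => q.2)) := by
  induction l generalizing acc with
  | nil => simp
  | cons p t ih =>
    simp only [List.foldl_cons, ih, List.flatMap_cons, ← List.append_assoc]
    congr 2
    rw [PySem.List.foldl_append_ite
      (p := fun q : Int × Int => p.1 = 0 ∨ p.1 = n - 1 ∨ q.1 = 0 ∨
        q.1 = ((p.2.length : Int)) - 1) (f := fun q => q.2)]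
    simp

theorem alt_eq_M_edges (numbers : List (List Int)) :
    max_on_edge_alt numbers = (PySem.List.max? (edgesOf numbers) (fun y => y)).getD 0 := by
  simp only [max_on_edge_alt, edgesOf]
  rw [outer_fold]
  simp

theorem mem_edges_iff (numbers : List (List Int)) (v : Int) :
    v ∈ edgesOf numbers ↔
      ∃ (k : Nat) (hk : k < numbers.length) (m : Nat) (hm : m < (numbers[k]).length),
        ((k : Int) = 0 ∨ (k : Int) = (numbers.length : Int) - 1 ∨ (m : Int) = 0 ∨
          (m : Int) = ((numbers[k]).length : Int) - 1) ∧ v = (numbers[k])[m] := by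
  simp only [edgesOf, List.mem_flatMap, List.mem_map, List.mem_filter,
    PySem.List.mem_enumerate_iff, decide_eq_true_iff]
  constructor
  · rintro ⟨p, ⟨k, hk, rfl⟩, q, ⟨⟨m, hm, rfl⟩, hcond⟩, rfl⟩
    simp only [zero_add] at hcond ⊢
    exact ⟨k, hk, m, hm, hcond, rfl⟩
  · rintro ⟨k, hk, m, hm, hcond, rfl⟩
    refine ⟨((k : Int), numbers[k]), ⟨k, hk, by simp⟩,
      ((m : Int), (numbers[k])[m]), ⟨⟨m, hm, by simp⟩, ?_⟩, rfl⟩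
    simpa using hcond

theorem max_on_edge_eq (numbers : List (List Int)) (h : Pre_max_on_edge numbers) :
    max_on_edge numbers = max_on_edge_alt numbers := by
  obtain ⟨hne, hrows⟩ := h
  obtain ⟨r0, rest, rfl⟩ : ∃ r0 rest, numbers = r0 :: rest := by
    cases numbers with
    | nil => exact absurd rfl hne
    | cons a t => exact ⟨a, t, rfl⟩
  have hcons : (r0 :: rest : List (List Int)) ≠ [] := by simp
  have hr0 : r0 ≠ [] := hrows r0 (by simp)
  have hL : (r0 :: rest).getLast hcons ≠ [] := hrows _ (List.getLast_mem hcons)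
  rw [alt_eq_M_edges]
  simp only [max_on_edge]
  rw [PySem.List.foldl_pyRange_zero_pyGetD' (r0 :: rest) []
    (fun (p : List Int × List Int) row =>
      (p.1 ++ [PySem.List.pyGetD row 0 0], p.2 ++ [PySem.List.pyGetD row (-1) 0])) ([], [])]
  rw [col_fold_eq]
  rw [PySem.List.pyGet?_zero_cons, PySem.List.pyGet?_neg_one,
    List.getLast?_eq_some_getLast hcons]
  simp only [Option.getD_some, List.nil_append]
  set N : List (List Int) := r0 :: rest with hN
  set M : List Int → Int := fun l => (PySem.List.max? l (fun y => y)).getD 0 with hM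
  set L : List Int := N.getLast hcons with hLdef
  set E : List Int := edgesOf N with hE
  have hNlen : 0 < N.length := List.length_pos_iff.mpr hcons
  have hr0len : 0 < r0.length := List.length_pos_iff.mpr hr0
  have hN0 : N[0] = r0 := rfl
  have hNlast : N[N.length - 1]'(by omega) = L := (List.getLast_eq_getElem hcons).symm
  -- the top-left cell is in E, so E is nonempty
  have hEne : E ≠ [] := by
    have : r0[0] ∈ E := by
      rw [hE, mem_edges_iff]
      exact ⟨0, hNlen, 0, by simpa [hN0] using hr0len, Or.inl rfl, by simp [hN0]⟩
    exact List.ne_nil_of_mem this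
  -- generic membership of picked cells in E
  have hcell_mem : ∀ (k : Nat) (hk : k < N.length) (m : Nat) (hm : m < (N[k]).length),
      ((k : Int) = 0 ∨ (k : Int) = (N.length : Int) - 1 ∨ (m : Int) = 0 ∨
        (m : Int) = ((N[k]).length : Int) - 1) → (N[k])[m] ∈ E := by
    intro k hk m hm hc
    rw [hE, mem_edges_iff]
    exact ⟨k, hk, m, hm, hc, rfl⟩
  have hmapne : (N.map (fun row => PySem.List.pyGetD row 0 0)) ≠ [] := by simp [hN]
  have hmapne' : (N.map (fun row => PySem.List.pyGetD row (-1) 0)) ≠ [] := by simp [hN]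
  apply le_antisymm
  · -- A ≤ M E : each of the four maxima is ≤ M E
    have hrow_sub : ∀ (k : Nat) (hk : k < N.length),
        ((k : Int) = 0 ∨ (k : Int) = (N.length : Int) - 1) → M (N[k]) ≤ M E := by
      intro k hk hc
      have hkne : N[k] ≠ [] := hrows _ (List.getElem_mem hk)
      rw [M_le_iff _ hkne]
      intro y hy
      obtain ⟨m, hm, rfl⟩ := List.getElem_of_mem hy
      exact mem_le_M E hEne _ (hcell_mem k hk m hm (hc.elim Or.inl (fun h => Or.inr (Or.inl h))))
    refine max_le (max_le (max_le ?_ ?_) ?_) ?_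
    · have := hrow_sub 0 hNlen (Or.inl rfl)
      simpa [hN0] using this
    · -- left column
      rw [M_le_iff _ hmapne]
      intro y hy
      obtain ⟨row, hrow, rfl⟩ := List.mem_map.mp hy
      obtain ⟨k, hk, rfl⟩ := List.getElem_of_mem hrow
      have hkne : N[k] ≠ [] := hrows _ (List.getElem_mem hk)
      have hklen : 0 < (N[k]).length := List.length_pos_iff.mpr hkne
      show PySem.List.pyGetD (N[k]) 0 0 ≤ (PySem.List.max? E (fun y => y)).getD 0
      rw [h0_eq _ hklen]
      exact mem_le_M E hEne _ (hcell_mem k hk 0 hklen (Or.inr (Or.inr (Or.inl rfl))))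
    · -- right column
      rw [M_le_iff _ hmapne']
      intro y hy
      obtain ⟨row, hrow, rfl⟩ := List.mem_map.mp hy
      obtain ⟨k, hk, rfl⟩ := List.getElem_of_mem hrow
      have hkne : N[k] ≠ [] := hrows _ (List.getElem_mem hk)
      have hklen : 0 < (N[k]).length := List.length_pos_iff.mpr hkne
      show PySem.List.pyGetD (N[k]) (-1) 0 ≤ (PySem.List.max? E (fun y => y)).getD 0
      rw [h1_eq _ hkne]
      refine mem_le_M E hEne _ (hcell_mem k hk ((N[k]).length - 1) (by omega)
        (Or.inr (Or.inr (Or.inr ?_))))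
      push_cast [Nat.cast_sub (by omega : 1 ≤ (N[k]).length)]
      ring
    · have := hrow_sub (N.length - 1) (by omega) (Or.inr (by push_cast [Nat.cast_sub (by omega : 1 ≤ N.length)]; ring))
      simpa [hNlast] using this
  · -- M E ≤ A : every edge cell is bounded by one of the four maxima
    rw [M_le_iff _ hEne]
    intro v hv
    rw [hE, mem_edges_iff] at hv
    obtain ⟨k, hk, m, hm, hc, rfl⟩ := hv
    have hkne : N[k] ≠ [] := hrows _ (List.getElem_mem hk)
    rcases hc with hc | hc | hc | hc
    · -- first row
      have hk0 : k = 0 := by exact_mod_cast hc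
      subst hk0
      refine le_trans ?_ (le_max_left _ _)
      refine le_trans ?_ (le_max_left _ _)
      refine le_trans ?_ (le_max_left _ _)
      exact mem_le_M r0 hr0 _ (by rw [← hN0]; exact List.getElem_mem hm)
    · -- last row
      have hk0 : k = N.length - 1 := by omega
      subst hk0
      refine le_trans ?_ (le_max_right _ _)
      refine le_trans (mem_le_M (N[N.length - 1]'(by omega)) hkne _ (List.getElem_mem hm)) ?_
      rw [hNlast]
    · -- left column
      have hm0 : m = 0 := by exact_mod_cast hc
      subst hm0
      refine le_trans ?_ (le_max_left _ _)
      refine le_trans ?_ (le_max_left _ _)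
      refine le_trans ?_ (le_max_right _ _)
      refine mem_le_M _ hmapne _ ?_
      refine List.mem_map.mpr ⟨N[k], List.getElem_mem hk, ?_⟩
      exact h0_eq _ hm
    · -- right column
      have hm0 : m = (N[k]).length - 1 := by omega
      subst hm0
      refine le_trans ?_ (le_max_left _ _)
      refine le_trans ?_ (le_max_right _ _)
      refine mem_le_M _ hmapne' _ ?_
      refine List.mem_map.mpr ⟨N[k], List.getElem_mem hk, ?_⟩
      exact h1_eq _ hkne

-- ===== VERDICT (by name: the statement is the Claim_ definition above) =====
theorem max_on_edge_spec : Claim_equal_max_on_edge := by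
  intro numbers _ hpre
  unfold Spec_max_on_edge
  exact max_on_edge_eq numbers hpre
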